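-- pv_equiv track=rewrite | github.com/VariPhiGen/hailo_ai_acts | basic_pipelines/helper_utils.py | find_clusters_by_zone
-- ===== SOURCE A (Python) =====
-- from typing import List, Tuple, Dict, Any, Optional
--
-- def find_clusters_by_zone(gathered_tracker_ids: Dict[str, List[Tuple[int, int]]]) -> Dict[str, List[List[int]]]:
--     """
--     Find clusters of tracker IDs by zone using Union-Find algorithm.
--
--     Args:
--         gathered_tracker_ids: Dictionary mapping zone names to pairs of tracker IDs
--
--     Returns:
--         Dictionary mapping zone names to lists of tracker ID clusters
--     """
--     parent = {}
--
--     def find(x):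
--         if parent[x] != x:
--             parent[x] = find(parent[x])
--         return parent[x]
--
--     def union(x, y):
--         root_x = find(x)
--         root_y = find(y)
--         if root_x != root_y:
--             parent[root_y] = root_x
--
--     # Initialize Union-Find structure and process pairs
--     zone_clusters = {}
--     for zone_name, pairs in gathered_tracker_ids.items():
--         for tracker1, tracker2 in pairs:
--             if tracker1 not in parent:
--                 parent[tracker1] = tracker1
--             if tracker2 not in parent:
--                 parent[tracker2] = tracker2
--             union(tracker1, tracker2)
--
--     # Group elements by their root for each zone
--     for tracker in parent:
--         root = find(tracker)
--         zone_clusters.setdefault(root, []).append(tracker)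
--
--     # Organize clusters by zone name
--     result = {}
--     for zone_name in gathered_tracker_ids:
--         zone_result = []
--         seen = set()
--         for tracker1, tracker2 in gathered_tracker_ids[zone_name]:
--             root1, root2 = find(tracker1), find(tracker2)
--             if root1 not in seen:
--                 zone_result.append(zone_clusters[root1])
--                 seen.add(root1)
--             if root2 not in seen:
--                 zone_result.append(zone_clusters[root2])
--                 seen.add(root2)
--         result[zone_name] = zone_result
--
--     return result
-- ===== SOURCE B (Python) =====
-- def find_clusters_by_zone(gathered_tracker_ids):
--     # Flat label map with eager relabel-on-merge (no parent trees, no recursion).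
--     comp = {}
--     for pairs in gathered_tracker_ids.values():
--         for t1, t2 in pairs:
--             if t1 not in comp:
--                 comp[t1] = t1
--             if t2 not in comp:
--                 comp[t2] = t2
--             r1, r2 = comp[t1], comp[t2]
--             if r1 != r2:
--                 for k in comp:
--                     if comp[k] == r2:
--                         comp[k] = r1
--
--     clusters = {}
--     for t, r in comp.items():
--         clusters.setdefault(r, []).append(t)
--
--     result = {}
--     for zone_name, pairs in gathered_tracker_ids.items():
--         zone_result = []
--         seen = set()
--         for t1, t2 in pairs:
--             for r in (comp[t1], comp[t2]):
--                 if r not in seen: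
--                     zone_result.append(clusters[r])
--                     seen.add(r)
--         result[zone_name] = zone_result
--     return result
-- ===== Notes on version B (the rewrite author's own statement) =====
-- stated objective: simpler
-- what changed: Replaces the union-find forest with recursive path-compressing find by a flat tracker-to-label map that eagerly relabels the merged class on each union, so the output phases are plain lookups with no recursion or mutation.
import Mathlib
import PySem

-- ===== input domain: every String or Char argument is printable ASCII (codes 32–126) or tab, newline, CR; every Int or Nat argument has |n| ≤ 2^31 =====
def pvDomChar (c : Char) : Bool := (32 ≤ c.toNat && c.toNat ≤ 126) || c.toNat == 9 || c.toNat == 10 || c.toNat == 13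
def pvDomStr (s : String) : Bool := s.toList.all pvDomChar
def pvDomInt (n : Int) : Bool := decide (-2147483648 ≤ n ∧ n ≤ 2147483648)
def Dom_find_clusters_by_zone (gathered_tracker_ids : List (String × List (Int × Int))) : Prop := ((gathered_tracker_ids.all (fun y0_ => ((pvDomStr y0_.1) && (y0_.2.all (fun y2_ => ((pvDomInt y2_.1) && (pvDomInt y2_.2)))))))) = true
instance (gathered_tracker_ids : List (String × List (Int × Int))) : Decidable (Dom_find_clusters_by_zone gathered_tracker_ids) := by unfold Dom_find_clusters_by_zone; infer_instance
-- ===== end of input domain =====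

-- B replaces A's union-find forest (recursive path-compressing find) by a flat label map with
-- eager relabel-on-merge; objective: simpler (no recursion, no mutation in the output phases).

-- ===== PORT A =====
-- `find` with path compression; the Nat fuel is only a totality guard (Python's recursion
-- terminates on every state A builds); it returns (mutated parent, root).
def pvFindA (fuel : Nat) (p : PySem.Dict Int Int) (x : Int) : PySem.Dict Int Int × Int :=
  match fuel with
  | 0 => (p, x)
  | fuel + 1 =>
    let px := p.getD x x        -- parent[x] (always present at A's call sites)
    if px ≠ x then
      let r := pvFindA fuel p px      -- find(parent[x]) (mutates parent)
      (r.1.insert x r.2, r.2)         -- parent[x] = …; return parent[x]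
    else (p, x)

def pvUnionA (p : PySem.Dict Int Int) (x y : Int) : PySem.Dict Int Int :=
  let fx := pvFindA p.items.length p x
  let fy := pvFindA fx.1.items.length fx.1 y
  if fx.2 ≠ fy.2 then fy.1.insert fy.2 fx.2 else fy.1

-- body of the first loop for one pair: register fresh trackers, then union
def pvPairA (p : PySem.Dict Int Int) (pr : Int × Int) : PySem.Dict Int Int :=
  let p := if p.contains pr.1 then p else p.insert pr.1 pr.1
  let p := if p.contains pr.2 then p else p.insert pr.2 pr.2
  pvUnionA p pr.1 pr.2

-- first loop: initialise parent and union every pair, over all zones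
def pvInitA (gathered_tracker_ids : List (String × List (Int × Int))) : PySem.Dict Int Int :=
  gathered_tracker_ids.foldl (fun p zp => zp.2.foldl pvPairA p) PySem.Dict.empty

-- second loop: zone_clusters.setdefault(find(tracker), []).append(tracker), threading parent
def pvGroupA (p : PySem.Dict Int Int) :
    PySem.Dict Int Int × PySem.Dict Int (List Int) :=
  p.keys.foldl (fun st t =>
    let f := pvFindA st.1.items.length st.1 t
    (f.1, st.2.modify f.2 [] (· ++ [t]))) (p, PySem.Dict.empty)

-- body of the third loop for one zone: state (parent, seen, zone_result)
def pvZoneA (p : PySem.Dict Int Int) (zc : PySem.Dict Int (List Int))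
    (pairs : List (Int × Int)) :
    PySem.Dict Int Int × PySem.Set Int × List (List Int) :=
  pairs.foldl (fun st pr =>
    let f1 := pvFindA st.1.items.length st.1 pr.1
    let f2 := pvFindA f1.1.items.length f1.1 pr.2
    let s2 := if PySem.Set.contains st.2.1 f1.2 then (st.2.1, st.2.2)
              else (PySem.Set.add st.2.1 f1.2, st.2.2 ++ [zc.getD f1.2 []])
    let s3 := if PySem.Set.contains s2.1 f2.2 then s2
              else (PySem.Set.add s2.1 f2.2, s2.2 ++ [zc.getD f2.2 []])
    (f2.1, s3)) (p, PySem.Set.empty, [])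

def find_clusters_by_zone (gathered_tracker_ids : List (String × List (Int × Int))) : List (String × List (List Int)) :=
  let parent := pvInitA gathered_tracker_ids
  let g2 := pvGroupA parent
  let res := gathered_tracker_ids.foldl (fun st e =>
    let zr := pvZoneA st.1 g2.2 ((PySem.Dict.mk gathered_tracker_ids).getD e.1 [])
    (zr.1, st.2.insert e.1 zr.2.2))
    (g2.1, (PySem.Dict.empty : PySem.Dict String (List (List Int))))
  res.2.items

-- ===== PORT B =====
-- process one pair: register fresh trackers, then relabel r2's class to r1 if the labels differ
def pvMergeB (c : PySem.Dict Int Int) (t1 t2 : Int) : PySem.Dict Int Int :=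
  let c := if c.contains t1 then c else c.insert t1 t1
  let c := if c.contains t2 then c else c.insert t2 t2
  let r1 := c.getD t1 t1
  let r2 := c.getD t2 t2
  if r1 ≠ r2 then
    PySem.Dict.mk (c.items.map (fun kv => (kv.1, if kv.2 = r2 then r1 else kv.2)))
  else c

def pvCompB (gathered_tracker_ids : List (String × List (Int × Int))) : PySem.Dict Int Int :=
  gathered_tracker_ids.foldl (fun c zp =>
    zp.2.foldl (fun c pr => pvMergeB c pr.1 pr.2) c) PySem.Dict.empty

def pvClustersB (c : PySem.Dict Int Int) : PySem.Dict Int (List Int) :=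
  c.items.foldl (fun d kv => d.modify kv.2 [] (· ++ [kv.1])) PySem.Dict.empty

-- emit the cluster of one label if not yet seen in this zone
def pvEmitB (cl : PySem.Dict Int (List Int)) (st : PySem.Set Int × List (List Int))
    (r : Int) : PySem.Set Int × List (List Int) :=
  if PySem.Set.contains st.1 r then st
  else (PySem.Set.add st.1 r, st.2 ++ [cl.getD r []])

def pvZoneB (c : PySem.Dict Int Int) (cl : PySem.Dict Int (List Int))
    (pairs : List (Int × Int)) : List (List Int) :=
  (pairs.foldl (fun st pr =>
    pvEmitB cl (pvEmitB cl st (c.getD pr.1 pr.1)) (c.getD pr.2 pr.2))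
    (PySem.Set.empty, [])).2

def find_clusters_by_zone_alt (gathered_tracker_ids : List (String × List (Int × Int))) : List (String × List (List Int)) :=
  let c := pvCompB gathered_tracker_ids
  let cl := pvClustersB c
  (gathered_tracker_ids.foldl (fun res e => res.insert e.1 (pvZoneB c cl e.2))
    (PySem.Dict.empty : PySem.Dict String (List (List Int)))).items

-- ===== PRECONDITION & SPEC =====
-- Pre_ excludes association lists with a repeated zone name: those do not represent a Python
-- dict (A's argument type), so A's behaviour on them is not defined by the source.
def Pre_find_clusters_by_zone (gathered_tracker_ids : List (String × List (Int × Int))) : Prop :=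
  (gathered_tracker_ids.map Prod.fst).Nodup
instance (gathered_tracker_ids : List (String × List (Int × Int))) : Decidable (Pre_find_clusters_by_zone gathered_tracker_ids) := by unfold Pre_find_clusters_by_zone; infer_instance

def pvWitness_find_clusters_by_zone : (List (String × List (Int × Int))) :=
  [("a", [(1, 2), (3, 3)]), ("b", [(2, 3), (4, 5)]), ("c", [])]

def Spec_find_clusters_by_zone (gathered_tracker_ids : List (String × List (Int × Int))) (out : List (String × List (List Int))) : Prop := out = find_clusters_by_zone_alt gathered_tracker_ids
instance (gathered_tracker_ids : List (String × List (Int × Int))) (out : List (String × List (List Int))) : Decidable (Spec_find_clusters_by_zone gathered_tracker_ids out) := by unfold Spec_find_clusters_by_zone; infer_instance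

-- ===== CLAIM (what is proved, stated in full; the proofs are below) =====
def Claim_equal_find_clusters_by_zone : Prop := ∀ (gathered_tracker_ids : List (String × List (Int × Int))), Dom_find_clusters_by_zone gathered_tracker_ids → Pre_find_clusters_by_zone gathered_tracker_ids → Spec_find_clusters_by_zone gathered_tracker_ids (find_clusters_by_zone gathered_tracker_ids)

-- ===== LEMMAS AND PROOFS =====

-- a parent-pointer path from x to its root r, listing the visited nodes
inductive pvPath (p : PySem.Dict Int Int) : Int → Int → List Int → Prop
  | root (x : Int) (hm : p.contains x = true) (h : p.getD x x = x) : pvPath p x x [x]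
  | step (x r : Int) (l : List Int) (h : p.getD x x ≠ x)
      (ht : pvPath p (p.getD x x) r l) : pvPath p x r (x :: l)

theorem pvContains_of_getD_ne {p : PySem.Dict Int Int} {x d : Int}
    (h : p.getD x d ≠ d) : p.contains x = true := by
  by_cases hc : p.contains x = true
  · exact hc
  · exact absurd (PySem.Dict.getD_of_not_contains p d (by simpa using hc)) h

theorem pvPath_contains {p : PySem.Dict Int Int} {x r : Int} {l : List Int}
    (h : pvPath p x r l) : ∀ y ∈ l, p.contains y = true := by
  induction h with
  | root x hm _ => intro y hy; simp at hy; simpa [hy] using hm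
  | step x r l hx ht ih =>
    intro y hy
    rcases List.mem_cons.mp hy with h1 | h2
    · subst h1; exact pvContains_of_getD_ne hx
    · exact ih y h2

theorem pvPath_det {p : PySem.Dict Int Int} {x r r' : Int} {l l' : List Int}
    (h : pvPath p x r l) (h' : pvPath p x r' l') : r = r' ∧ l = l' := by
  induction h generalizing r' l' with
  | root x hm hroot =>
    cases h' with
    | root _ _ _ => exact ⟨rfl, rfl⟩
    | step _ _ _ hne _ => exact absurd hroot hne
  | step x r l hx ht ih =>
    cases h' with
    | root _ _ hroot => exact absurd hroot hx
    | step _ _ l₂ _ ht₂ =>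
      obtain ⟨h1, h2⟩ := ih ht₂
      exact ⟨h1, by rw [h2]⟩

theorem pvPath_suffix {p : PySem.Dict Int Int} {x r y : Int} {l : List Int}
    (h : pvPath p x r l) (hy : y ∈ l) : ∃ l', l' <:+ l ∧ pvPath p y r l' := by
  induction h with
  | root x hm hroot =>
    obtain rfl : y = x := by simpa using hy
    exact ⟨[y], List.suffix_refl _, pvPath.root y hm hroot⟩
  | step x r l hx ht ih =>
    rcases List.mem_cons.mp hy with h1 | h2
    · subst h1; exact ⟨y :: l, List.suffix_refl _, pvPath.step y r l hx ht⟩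
    · obtain ⟨l', hsuf, hp⟩ := ih h2
      exact ⟨l', hsuf.trans (List.suffix_cons _ _), hp⟩

theorem pvPath_nodup {p : PySem.Dict Int Int} {x r : Int} {l : List Int}
    (h : pvPath p x r l) : l.Nodup := by
  induction h with
  | root x _ _ => simp
  | step x r l hx ht ih =>
    refine List.nodup_cons.mpr ⟨?_, ih⟩
    intro hxl
    obtain ⟨l', hsuf, hp⟩ := pvPath_suffix ht hxl
    obtain ⟨_, hl⟩ := pvPath_det (pvPath.step x r l hx ht) hp
    have h1 : l'.length ≤ l.length := hsuf.length_le
    have h2 : (x :: l).length = l'.length := by rw [hl]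
    simp at h2; omega

theorem pvPath_root_self {p : PySem.Dict Int Int} {x r : Int} {l : List Int}
    (h : pvPath p x r l) : pvPath p r r [r] := by
  induction h with
  | root x hm hroot => exact pvPath.root x hm hroot
  | step _ _ _ _ _ ih => exact ih

theorem pvPath_length_le {p : PySem.Dict Int Int} {x r : Int} {l : List Int}
    (h : pvPath p x r l) : l.length ≤ p.items.length := by
  have hsub : l ⊆ p.keys := by
    intro y hy
    exact (PySem.Dict.contains_iff_mem_keys p y).mp (pvPath_contains h y hy)
  have := (List.subperm_of_subset (pvPath_nodup h) hsub).length_le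
  simpa [PySem.Dict.keys] using this

theorem pvPath_nil_elim {p : PySem.Dict Int Int} {x r : Int}
    (h : pvPath p x r []) : False := by cases h

theorem pvPath_singleton {p : PySem.Dict Int Int} {x s y : Int}
    (h : pvPath p x s [y]) : p.contains x = true ∧ p.getD x x = x := by
  cases h with
  | root _ hm hg => exact ⟨hm, hg⟩
  | step _ _ _ _ ht => exact absurd ht pvPath_nil_elim

theorem pvPath_self_elim {p : PySem.Dict Int Int} {r : Int}
    (h : pvPath p r r [r]) : p.contains r = true ∧ p.getD r r = r :=
  pvPath_singleton h

-- inserting a key absent from p preserves every path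
theorem pvPath_insert_fresh {p : PySem.Dict Int Int} {z w : Int}
    (hz : p.contains z = false) {y s : Int} {m : List Int}
    (h : pvPath p y s m) : pvPath (p.insert z w) y s m := by
  induction h with
  | root x hm hroot =>
    have hne : x ≠ z := by intro he; rw [he] at hm; rw [hm] at hz; cases hz
    refine pvPath.root x ?_ ?_
    · rw [PySem.Dict.contains_insert]; simp [hm]
    · rw [PySem.Dict.getD_insert]; simp [hne, hroot]
  | step x r l hx ht ih =>
    have hm : p.contains x = true := pvContains_of_getD_ne hx
    have hne : x ≠ z := by intro he; rw [he] at hm; rw [hm] at hz; cases hz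
    have hget : (p.insert z w).getD x x = p.getD x x := by
      rw [PySem.Dict.getD_insert]; simp [hne]
    refine pvPath.step x r l ?_ ?_
    · rw [hget]; exact hx
    · rw [hget]; exact ih

-- compression: pointing x straight at its own root preserves every path's root
theorem pvPath_compress {p : PySem.Dict Int Int} {x r : Int} {lx : List Int}
    (hx : pvPath p x r lx) {y s : Int} {m : List Int}
    (h : pvPath p y s m) : ∃ m', pvPath (p.insert x r) y s m' := by
  obtain ⟨hrm, hrg⟩ := pvPath_self_elim (pvPath_root_self hx)
  induction h with
  | root y hm hroot =>
    by_cases hyx : y = x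
    · -- x is itself a root, so r = x and the inserted edge is the self-loop again
      subst hyx
      obtain ⟨hre, _⟩ := pvPath_det hx (pvPath.root y hm hroot)
      refine ⟨[y], pvPath.root y (by rw [PySem.Dict.contains_insert]; simp [hm]) ?_⟩
      rw [PySem.Dict.getD_insert]
      simp [hre]
    · exact ⟨[y], pvPath.root y (by rw [PySem.Dict.contains_insert]; simp [hm])
        (by rw [PySem.Dict.getD_insert]; simp [hyx, hroot])⟩
  | step y s m hy ht ih =>
    by_cases hyx : y = x
    · subst hyx
      obtain ⟨hrs, _⟩ := pvPath_det hx (pvPath.step y s m hy ht)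
      have hry : r ≠ y := by intro he; rw [he] at hrg; exact hy hrg
      have hg : (p.insert y r).getD y y = r := PySem.Dict.getD_insert_self p y r y
      refine ⟨[y, r], hrs ▸ ?_⟩
      refine pvPath.step y r [r] (by rw [hg]; exact hry) ?_
      rw [hg]
      exact pvPath.root r (by rw [PySem.Dict.contains_insert]; simp [hrm])
        (by rw [PySem.Dict.getD_insert]; simp [hry, hrg])
    · have hg : (p.insert x r).getD y y = p.getD y y := by
        rw [PySem.Dict.getD_insert]; simp [hyx]
      obtain ⟨m', hm'⟩ := ih
      exact ⟨y :: m', pvPath.step y s m' (by rw [hg]; exact hy) (by rw [hg]; exact hm')⟩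

-- union: redirecting root b to root a sends every root s to (if s = b then a else s)
theorem pvPath_union {p : PySem.Dict Int Int} {a b : Int}
    (ham : p.contains a = true) (hag : p.getD a a = a)
    (hbg : p.getD b b = b) (hab : a ≠ b) {y s : Int} {m : List Int}
    (h : pvPath p y s m) :
    ∃ m', pvPath (p.insert b a) y (if s = b then a else s) m' := by
  induction h with
  | root y hm hroot =>
    by_cases hyb : y = b
    · subst hyb
      have hg : (p.insert y a).getD y y = a := PySem.Dict.getD_insert_self p y a y
      rw [if_pos rfl]
      refine ⟨[y, a], pvPath.step y a [a] (by rw [hg]; exact hab) ?_⟩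
      rw [hg]
      exact pvPath.root a (by rw [PySem.Dict.contains_insert]; simp [ham])
        (by rw [PySem.Dict.getD_insert]; simp [hab, hag])
    · rw [if_neg hyb]
      exact ⟨[y], pvPath.root y (by rw [PySem.Dict.contains_insert]; simp [hm])
        (by rw [PySem.Dict.getD_insert]; simp [hyb, hroot])⟩
  | step y s m hy ht ih =>
    have hyb : y ≠ b := by intro he; rw [he] at hy; exact hy hbg
    have hg : (p.insert b a).getD y y = p.getD y y := by
      rw [PySem.Dict.getD_insert]; simp [hyb]
    obtain ⟨m', hm'⟩ := ih
    exact ⟨y :: m', pvPath.step y _ m' (by rw [hg]; exact hy) (by rw [hg]; exact hm')⟩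

-- the main lemma about A's find: value, keys, and preservation of every path's root
theorem pvFindA_main {p : PySem.Dict Int Int} {x r : Int} {l : List Int}
    (h : pvPath p x r l) :
    ∀ fuel, l.length ≤ fuel →
      (pvFindA fuel p x).2 = r ∧ (pvFindA fuel p x).1.keys = p.keys ∧
      (∀ y s m, pvPath p y s m → ∃ m', pvPath (pvFindA fuel p x).1 y s m') := by
  induction h with
  | root x hm hroot =>
    intro fuel hfuel
    match fuel, hfuel with
    | fuel + 1, _ =>
      simp [pvFindA, hroot]
      exact fun y s m hp => ⟨m, hp⟩
  | step x r l hx ht ih =>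
    intro fuel hfuel
    match fuel, hfuel with
    | fuel + 1, hfuel =>
      have hfl : l.length ≤ fuel := by simp at hfuel; omega
      obtain ⟨hv, hk, hpres⟩ := ih fuel hfl
      have hxmem : p.contains x = true := pvContains_of_getD_ne hx
      -- x's own path survives the recursive call
      obtain ⟨lx', hlx'⟩ := hpres x r (x :: l) (pvPath.step x r l hx ht)
      have hxm1 : (pvFindA fuel p (p.getD x x)).1.contains x = true := by
        rw [PySem.Dict.contains_eq_decide_mem_keys, hk,
          ← PySem.Dict.contains_eq_decide_mem_keys]
        exact hxmem
      simp only [pvFindA, if_pos hx]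
      refine ⟨by rw [hv], ?_, ?_⟩
      · rw [hv, PySem.Dict.keys_insert_of_contains _ _ hxm1, hk]
      · intro y s m hp
        obtain ⟨m₁, hm₁⟩ := hpres y s m hp
        rw [hv]
        exact pvPath_compress hlx' hm₁

-- the simulation invariant: parent and comp share their (nodup) key list, and each
-- tracker's union-find root is its comp label
def pvInv (p c : PySem.Dict Int Int) : Prop :=
  p.keys = c.keys ∧ p.keys.Nodup ∧ ∀ x ∈ p.keys, ∃ l, pvPath p x (c.getD x x) l

theorem pvInv_root {p c : PySem.Dict Int Int} (h : pvInv p c) {x : Int}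
    (hx : x ∈ p.keys) :
    c.getD x x ∈ p.keys ∧ p.getD (c.getD x x) (c.getD x x) = c.getD x x ∧
      p.contains (c.getD x x) = true ∧ c.getD (c.getD x x) (c.getD x x) = c.getD x x := by
  obtain ⟨hk, hnd, hlab⟩ := h
  obtain ⟨l, hl⟩ := hlab x hx
  set r := c.getD x x with hr
  have hrr : pvPath p r r [r] := pvPath_root_self hl
  obtain ⟨hrm, hrg⟩ := pvPath_self_elim hrr
  have hrk : r ∈ p.keys := (PySem.Dict.contains_iff_mem_keys p r).mp hrm
  obtain ⟨l', hl'⟩ := hlab r hrk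
  obtain ⟨hre, _⟩ := pvPath_det hrr hl'
  exact ⟨hrk, hrg, hrm, hre.symm⟩

theorem pvFindA_inv {p c : PySem.Dict Int Int} (h : pvInv p c) {x : Int}
    (hx : x ∈ p.keys) :
    (pvFindA p.items.length p x).2 = c.getD x x ∧
    (pvFindA p.items.length p x).1.keys = p.keys ∧
    pvInv (pvFindA p.items.length p x).1 c := by
  obtain ⟨hk, hnd, hlab⟩ := h
  obtain ⟨l, hl⟩ := hlab x hx
  obtain ⟨hv, hkeys, hpres⟩ := pvFindA_main hl p.items.length (pvPath_length_le hl)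
  refine ⟨hv, hkeys, by rw [hkeys, hk], by rw [hkeys]; exact hnd, ?_⟩
  intro y hy
  rw [hkeys] at hy
  obtain ⟨m, hm⟩ := hlab y hy
  exact hpres y _ m hm

theorem pvContains_eq {p c : PySem.Dict Int Int} (hk : p.keys = c.keys) (t : Int) :
    p.contains t = c.contains t := by
  rw [PySem.Dict.contains_eq_decide_mem_keys, PySem.Dict.contains_eq_decide_mem_keys, hk]

theorem pvInv_insert_fresh {p c : PySem.Dict Int Int} (h : pvInv p c) {t : Int}
    (ht : p.contains t = false) : pvInv (p.insert t t) (c.insert t t) := by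
  obtain ⟨hk, hnd, hlab⟩ := h
  have htc : c.contains t = false := by rw [← pvContains_eq hk]; exact ht
  have hkp := PySem.Dict.keys_insert_of_not_contains p t ht
  have hkc := PySem.Dict.keys_insert_of_not_contains c t htc
  have htk : t ∉ p.keys := by
    intro hm; rw [(PySem.Dict.contains_iff_mem_keys p t).mpr hm] at ht; cases ht
  refine ⟨by rw [hkp, hkc, hk], by
    rw [hkp]
    refine List.Nodup.append hnd (by simp) ?_
    intro a ha hb
    obtain rfl : a = t := by simpa using hb
    exact htk ha, ?_⟩
  intro y hy
  rw [hkp, List.mem_append] at hy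
  rcases hy with hy | hy
  · obtain ⟨l, hl⟩ := hlab y hy
    have hyt : y ≠ t := fun he => htk (he ▸ hy)
    have hc : (c.insert t t).getD y y = c.getD y y := by
      rw [PySem.Dict.getD_insert]; simp [hyt]
    exact ⟨l, hc ▸ pvPath_insert_fresh ht hl⟩
  · obtain rfl : y = t := by simpa using hy
    refine ⟨[y], ?_⟩
    have hc : (c.insert y y).getD y y = y := PySem.Dict.getD_insert_self c y y y
    rw [hc]
    exact pvPath.root y (by rw [PySem.Dict.contains_insert]; simp)
      (PySem.Dict.getD_insert_self p y y y)

theorem pvRelabel_find? (g : Int → Int) (y : Int) : ∀ l : List (Int × Int),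
    Option.map (fun x : Int × Int => x.2)
      (List.find? (fun p => p.1 == y) (l.map (fun kv => (kv.1, g kv.2))))
      = Option.map g (Option.map (fun x : Int × Int => x.2)
          (List.find? (fun p => p.1 == y) l))
  | [] => rfl
  | kv :: rest => by
    by_cases hk : (kv.1 == y) = true
    · simp [hk]
    · simp only [List.map_cons, List.find?_cons, hk]
      simpa [hk] using pvRelabel_find? g y rest

theorem pvRelabel_get? (c : PySem.Dict Int Int) (g : Int → Int) (y : Int) :
    (PySem.Dict.mk (c.items.map (fun kv => (kv.1, g kv.2)))).get? y
      = (c.get? y).map g := by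
  obtain ⟨items⟩ := c
  exact pvRelabel_find? g y items

theorem pvRelabel_keys (c : PySem.Dict Int Int) (g : Int → Int) :
    (PySem.Dict.mk (c.items.map (fun kv => (kv.1, g kv.2)))).keys = c.keys := by
  simp [PySem.Dict.keys]

theorem pvRelabel_getD (c : PySem.Dict Int Int) (g : Int → Int) {y : Int}
    (hy : y ∈ c.keys) :
    (PySem.Dict.mk (c.items.map (fun kv => (kv.1, g kv.2)))).getD y y
      = g (c.getD y y) := by
  rw [PySem.Dict.getD_eq_get?_getD, pvRelabel_get?]
  rcases he : c.get? y with _ | v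
  · exact absurd ((PySem.Dict.get?_eq_none_iff_not_mem_keys c y).mp he) (not_not_intro hy)
  · rw [PySem.Dict.getD_eq_get?_getD, he]; rfl

theorem pvUnionA_main {p c : PySem.Dict Int Int} (h : pvInv p c) {t1 t2 : Int}
    (h1 : t1 ∈ p.keys) (h2 : t2 ∈ p.keys) :
    pvInv (pvUnionA p t1 t2)
      (if c.getD t1 t1 ≠ c.getD t2 t2 then
        PySem.Dict.mk (c.items.map
          (fun kv => (kv.1, if kv.2 = c.getD t2 t2 then c.getD t1 t1 else kv.2)))
      else c) ∧ (pvUnionA p t1 t2).keys = p.keys := by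
  obtain ⟨hv1, hk1, hinv1⟩ := pvFindA_inv h h1
  have h2' : t2 ∈ (pvFindA p.items.length p t1).1.keys := by rw [hk1]; exact h2
  obtain ⟨hv2, hk2, hinv2⟩ := pvFindA_inv hinv1 h2'
  set p1 := (pvFindA p.items.length p t1).1 with hp1
  set p2 := (pvFindA p1.items.length p1 t2).1 with hp2
  set r1 := c.getD t1 t1 with hr1
  set r2 := c.getD t2 t2 with hr2
  have hkeys2 : p2.keys = p.keys := by rw [hk2, hk1]
  have h1'' : t1 ∈ p2.keys := by rw [hkeys2]; exact h1
  have h2'' : t2 ∈ p2.keys := by rw [hkeys2]; exact h2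
  obtain ⟨ha_mem, ha_g, ha_c, ha_lab⟩ := pvInv_root hinv2 h1''
  obtain ⟨hb_mem, hb_g, hb_c, hb_lab⟩ := pvInv_root hinv2 h2''
  rw [show pvUnionA p t1 t2
      = (if (pvFindA p.items.length p t1).2 ≠ (pvFindA p1.items.length p1 t2).2
          then p2.insert (pvFindA p1.items.length p1 t2).2 (pvFindA p.items.length p t1).2
          else p2) from rfl, hv1, hv2]
  by_cases hne : r1 ≠ r2
  · rw [if_pos hne, if_pos hne]
    obtain ⟨hkc, hnd, hlab⟩ := hinv2
    have hknew : (p2.insert r2 r1).keys = p2.keys :=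
      PySem.Dict.keys_insert_of_contains p2 r1 hb_c
    refine ⟨⟨?_, ?_, ?_⟩, by rw [hknew, hkeys2]⟩
    · rw [hknew, hkc]
      exact (pvRelabel_keys c (fun v => if v = r2 then r1 else v)).symm
    · rw [hknew]; exact hnd
    · intro y hy
      rw [hknew] at hy
      obtain ⟨m, hm⟩ := hlab y hy
      obtain ⟨m', hm'⟩ := pvPath_union ha_c ha_g hb_g hne hm
      refine ⟨m', ?_⟩
      have hyc : y ∈ c.keys := by rw [← hkc]; exact hy
      have hgd := pvRelabel_getD c (fun v => if v = r2 then r1 else v) hyc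
      rw [show ((PySem.Dict.mk (c.items.map
          (fun kv => (kv.1, if kv.2 = r2 then r1 else kv.2)))).getD y y : Int)
        = (if c.getD y y = r2 then r1 else c.getD y y) from hgd]
      exact hm'
  · rw [if_neg hne, if_neg hne]
    exact ⟨hinv2, hkeys2⟩

theorem pvReg_main {p c : PySem.Dict Int Int} (h : pvInv p c) (t : Int) :
    pvInv (if p.contains t then p else p.insert t t)
      (if c.contains t then c else c.insert t t) ∧
    (if p.contains t then p else p.insert t t).keys = PySem.Set.add p.keys t := by
  have hcc := pvContains_eq h.1 t
  by_cases h1 : p.contains t = true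
  · rw [if_pos h1, if_pos (by rw [← hcc]; exact h1)]
    have ht : t ∈ p.keys := (PySem.Dict.contains_iff_mem_keys p t).mp h1
    rw [PySem.Set.add_eq_ite, if_pos ht]
    exact ⟨h, rfl⟩
  · have h1' : p.contains t = false := by simpa using h1
    have hc1' : c.contains t = false := by rw [← hcc]; exact h1'
    rw [if_neg h1, if_neg (by rw [← hcc]; exact h1)]
    have htk : t ∉ p.keys := fun hm =>
      h1 ((PySem.Dict.contains_iff_mem_keys p t).mpr hm)
    rw [PySem.Set.add_eq_ite, if_neg htk]
    exact ⟨pvInv_insert_fresh h h1', PySem.Dict.keys_insert_of_not_contains p t h1'⟩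

theorem pvPair_main {p c : PySem.Dict Int Int} (h : pvInv p c) (pr : Int × Int) :
    pvInv (pvPairA p pr) (pvMergeB c pr.1 pr.2) ∧
      (pvPairA p pr).keys = PySem.Set.add (PySem.Set.add p.keys pr.1) pr.2 := by
  obtain ⟨hi1, hk1⟩ := pvReg_main h pr.1
  obtain ⟨hi2, hk2⟩ := pvReg_main hi1 pr.2
  have hm2 : pr.2 ∈ (if (if p.contains pr.1 then p else p.insert pr.1 pr.1).contains pr.2
      then (if p.contains pr.1 then p else p.insert pr.1 pr.1)
      else (if p.contains pr.1 then p else p.insert pr.1 pr.1).insert pr.2 pr.2).keys := by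
    rw [hk2]; exact (PySem.Set.mem_add _ _ _).mpr (Or.inr rfl)
  have hm1 : pr.1 ∈ (if (if p.contains pr.1 then p else p.insert pr.1 pr.1).contains pr.2
      then (if p.contains pr.1 then p else p.insert pr.1 pr.1)
      else (if p.contains pr.1 then p else p.insert pr.1 pr.1).insert pr.2 pr.2).keys := by
    rw [hk2]
    refine (PySem.Set.mem_add _ _ _).mpr (Or.inl ?_)
    rw [hk1]
    exact (PySem.Set.mem_add _ _ _).mpr (Or.inr rfl)
  obtain ⟨hi3, hk3⟩ := pvUnionA_main hi2 hm1 hm2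
  exact ⟨hi3, by rw [show (pvPairA p pr).keys
    = (pvUnionA (if (if p.contains pr.1 then p else p.insert pr.1 pr.1).contains pr.2
        then (if p.contains pr.1 then p else p.insert pr.1 pr.1)
        else (if p.contains pr.1 then p else p.insert pr.1 pr.1).insert pr.2 pr.2)
        pr.1 pr.2).keys from rfl, hk3, hk2, hk1]⟩

theorem pvInner_main (prs : List (Int × Int)) :
    ∀ {p c : PySem.Dict Int Int}, pvInv p c →
      pvInv (prs.foldl pvPairA p) (prs.foldl (fun c pr => pvMergeB c pr.1 pr.2) c) ∧
      (∀ y ∈ p.keys, y ∈ (prs.foldl pvPairA p).keys) ∧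
      (∀ pr ∈ prs, pr.1 ∈ (prs.foldl pvPairA p).keys ∧
        pr.2 ∈ (prs.foldl pvPairA p).keys) := by
  induction prs with
  | nil => exact fun h => ⟨h, fun y hy => hy, by simp⟩
  | cons pr prs ih =>
    intro p c h
    obtain ⟨h1, hk1⟩ := pvPair_main h pr
    obtain ⟨hI, hmono, hprs⟩ := ih h1
    simp only [List.foldl_cons]
    refine ⟨hI, ?_, ?_⟩
    · intro y hy
      refine hmono y ?_
      rw [hk1]
      exact (PySem.Set.mem_add _ _ _).mpr
        (Or.inl ((PySem.Set.mem_add _ _ _).mpr (Or.inl hy)))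
    · intro q hq
      rcases List.mem_cons.mp hq with rfl | hq'
      · constructor
        · refine hmono q.1 ?_
          rw [hk1]
          exact (PySem.Set.mem_add _ _ _).mpr
            (Or.inl ((PySem.Set.mem_add _ _ _).mpr (Or.inr rfl)))
        · refine hmono q.2 ?_
          rw [hk1]
          exact (PySem.Set.mem_add _ _ _).mpr (Or.inr rfl)
      · exact hprs q hq'

theorem pvInv_empty : pvInv PySem.Dict.empty PySem.Dict.empty := by
  refine ⟨rfl, ?_, ?_⟩
  · rw [show (PySem.Dict.empty : PySem.Dict Int Int).keys = [] from rfl]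
    exact List.nodup_nil
  · intro x hx
    rw [show (PySem.Dict.empty : PySem.Dict Int Int).keys = [] from rfl] at hx
    cases hx

theorem pvPhase1_main (g : List (String × List (Int × Int))) :
    pvInv (pvInitA g) (pvCompB g) ∧
    ∀ e ∈ g, ∀ q ∈ e.2, q.1 ∈ (pvInitA g).keys ∧ q.2 ∈ (pvInitA g).keys := by
  suffices haux : ∀ (zs : List (String × List (Int × Int))) {p c : PySem.Dict Int Int},
      pvInv p c →
      pvInv (zs.foldl (fun p zp => zp.2.foldl pvPairA p) p)
        (zs.foldl (fun c zp => zp.2.foldl (fun c pr => pvMergeB c pr.1 pr.2) c) c) ∧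
      (∀ y ∈ p.keys, y ∈ (zs.foldl (fun p zp => zp.2.foldl pvPairA p) p).keys) ∧
      (∀ e ∈ zs, ∀ q ∈ e.2,
        q.1 ∈ (zs.foldl (fun p zp => zp.2.foldl pvPairA p) p).keys ∧
        q.2 ∈ (zs.foldl (fun p zp => zp.2.foldl pvPairA p) p).keys) by
    obtain ⟨hI, _, hmem⟩ := haux g pvInv_empty
    exact ⟨hI, hmem⟩
  intro zs
  induction zs with
  | nil => exact fun h => ⟨h, fun y hy => hy, by simp⟩
  | cons e zs ih =>
    intro p c h
    obtain ⟨h1, hmono1, hprs1⟩ := pvInner_main e.2 h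
    obtain ⟨hI, hmono, hmem⟩ := ih h1
    simp only [List.foldl_cons]
    refine ⟨hI, fun y hy => hmono y (hmono1 y hy), ?_⟩
    intro e' he' q hq
    rcases List.mem_cons.mp he' with rfl | he''
    · obtain ⟨hq1, hq2⟩ := hprs1 q hq
      exact ⟨hmono q.1 hq1, hmono q.2 hq2⟩
    · exact hmem e' he'' q hq

theorem pvGetD_irrel {c : PySem.Dict Int Int} {k : Int} (hk : k ∈ c.keys)
    (d1 d2 : Int) : c.getD k d1 = c.getD k d2 := by
  rcases he : c.get? k with _ | v
  · exact absurd ((PySem.Dict.get?_eq_none_iff_not_mem_keys c k).mp he) (not_not_intro hk)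
  · rw [PySem.Dict.getD_eq_get?_getD, PySem.Dict.getD_eq_get?_getD, he]
    rfl

theorem pvGroup_go (ks : List Int) :
    ∀ {p c : PySem.Dict Int Int}, pvInv p c → (∀ k ∈ ks, k ∈ p.keys) →
    ∀ (d0 : PySem.Dict Int (List Int)),
      pvInv (ks.foldl (fun st t =>
        let f := pvFindA st.1.items.length st.1 t
        (f.1, st.2.modify f.2 [] (· ++ [t]))) (p, d0)).1 c ∧
      (ks.foldl (fun st t =>
        let f := pvFindA st.1.items.length st.1 t
        (f.1, st.2.modify f.2 [] (· ++ [t]))) (p, d0)).1.keys = p.keys ∧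
      (ks.foldl (fun st t =>
        let f := pvFindA st.1.items.length st.1 t
        (f.1, st.2.modify f.2 [] (· ++ [t]))) (p, d0)).2
        = ks.foldl (fun d t => d.modify (c.getD t t) [] (· ++ [t])) d0 := by
  induction ks with
  | nil => exact fun h _ d0 => ⟨h, rfl, rfl⟩
  | cons k ks ih =>
    intro p c h hks d0
    have hk : k ∈ p.keys := hks k (List.mem_cons_self)
    obtain ⟨hv, hkeys, hinv⟩ := pvFindA_inv h hk
    have hks' : ∀ k' ∈ ks, k' ∈ (pvFindA p.items.length p k).1.keys := by
      intro k' hk'; rw [hkeys]; exact hks k' (List.mem_cons_of_mem _ hk')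
    obtain ⟨hI, hK, hD⟩ := ih hinv hks' (d0.modify (c.getD k k) [] (· ++ [k]))
    simp only [List.foldl_cons]
    rw [hv]
    exact ⟨hI, hK.trans hkeys, hD⟩

theorem pvZone_go (pairs : List (Int × Int)) :
    ∀ {p c : PySem.Dict Int Int}, pvInv p c →
      (∀ q ∈ pairs, q.1 ∈ p.keys ∧ q.2 ∈ p.keys) →
    ∀ (cl : PySem.Dict Int (List Int)) (st : PySem.Set Int × List (List Int)),
      pvInv (pairs.foldl (fun st pr =>
        let f1 := pvFindA st.1.items.length st.1 pr.1
        let f2 := pvFindA f1.1.items.length f1.1 pr.2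
        let s2 := if PySem.Set.contains st.2.1 f1.2 then (st.2.1, st.2.2)
                  else (PySem.Set.add st.2.1 f1.2, st.2.2 ++ [cl.getD f1.2 []])
        let s3 := if PySem.Set.contains s2.1 f2.2 then s2
                  else (PySem.Set.add s2.1 f2.2, s2.2 ++ [cl.getD f2.2 []])
        (f2.1, s3)) (p, st)).1 c ∧
      (pairs.foldl (fun st pr =>
        let f1 := pvFindA st.1.items.length st.1 pr.1
        let f2 := pvFindA f1.1.items.length f1.1 pr.2
        let s2 := if PySem.Set.contains st.2.1 f1.2 then (st.2.1, st.2.2)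
                  else (PySem.Set.add st.2.1 f1.2, st.2.2 ++ [cl.getD f1.2 []])
        let s3 := if PySem.Set.contains s2.1 f2.2 then s2
                  else (PySem.Set.add s2.1 f2.2, s2.2 ++ [cl.getD f2.2 []])
        (f2.1, s3)) (p, st)).1.keys = p.keys ∧
      (pairs.foldl (fun st pr =>
        let f1 := pvFindA st.1.items.length st.1 pr.1
        let f2 := pvFindA f1.1.items.length f1.1 pr.2
        let s2 := if PySem.Set.contains st.2.1 f1.2 then (st.2.1, st.2.2)
                  else (PySem.Set.add st.2.1 f1.2, st.2.2 ++ [cl.getD f1.2 []])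
        let s3 := if PySem.Set.contains s2.1 f2.2 then s2
                  else (PySem.Set.add s2.1 f2.2, s2.2 ++ [cl.getD f2.2 []])
        (f2.1, s3)) (p, st)).2
        = pairs.foldl (fun st pr =>
            pvEmitB cl (pvEmitB cl st (c.getD pr.1 pr.1)) (c.getD pr.2 pr.2)) st := by
  induction pairs with
  | nil => exact fun h _ cl st => ⟨h, rfl, rfl⟩
  | cons pr pairs ih =>
    intro p c h hmem cl st
    obtain ⟨hq1, hq2⟩ := hmem pr (List.mem_cons_self)
    obtain ⟨hv1, hkeys1, hinv1⟩ := pvFindA_inv h hq1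
    have hq2' : pr.2 ∈ (pvFindA p.items.length p pr.1).1.keys := by
      rw [hkeys1]; exact hq2
    obtain ⟨hv2, hkeys2, hinv2⟩ := pvFindA_inv hinv1 hq2'
    have hmem' : ∀ q ∈ pairs,
        q.1 ∈ (pvFindA (pvFindA p.items.length p pr.1).1.items.length
          (pvFindA p.items.length p pr.1).1 pr.2).1.keys ∧
        q.2 ∈ (pvFindA (pvFindA p.items.length p pr.1).1.items.length
          (pvFindA p.items.length p pr.1).1 pr.2).1.keys := by
      intro q hq
      rw [hkeys2, hkeys1]
      exact hmem q (List.mem_cons_of_mem _ hq)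
    obtain ⟨hI, hK, hD⟩ := ih hinv2 hmem' cl
      (pvEmitB cl (pvEmitB cl st (c.getD pr.1 pr.1)) (c.getD pr.2 pr.2))
    simp only [List.foldl_cons]
    rw [hv1, hv2]
    exact ⟨hI, hK.trans (hkeys2.trans hkeys1), hD⟩

theorem pvClusters_eq {p c : PySem.Dict Int Int} (h : pvInv p c) :
    (pvGroupA p).2 = pvClustersB c ∧ pvInv (pvGroupA p).1 c ∧
      (pvGroupA p).1.keys = p.keys := by
  obtain ⟨hI, hK, hD⟩ := pvGroup_go p.keys h (fun k hk => hk) PySem.Dict.empty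
  refine ⟨?_, hI, hK⟩
  refine hD.trans ?_
  have hnd : c.keys.Nodup := h.1 ▸ h.2.1
  rw [show pvClustersB c
    = c.items.foldl (fun d kv => d.modify kv.2 [] (· ++ [kv.1])) PySem.Dict.empty from rfl]
  rw [PySem.Dict.items_eq_map_keys c hnd 0, List.foldl_map, h.1]
  exact PySem.List.foldl_congr_mem c.keys _ _ _
    (fun d k hk => by rw [pvGetD_irrel hk k 0])

theorem pvRes_go (zs : List (String × List (Int × Int))) :
    ∀ {p c : PySem.Dict Int Int}, pvInv p c →
    ∀ (cl : PySem.Dict Int (List Int)),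
      (∀ e ∈ zs, ∀ q ∈ e.2, q.1 ∈ p.keys ∧ q.2 ∈ p.keys) →
    ∀ (lk : String → List (Int × Int)), (∀ e ∈ zs, lk e.1 = e.2) →
    ∀ (res : PySem.Dict String (List (List Int))),
      (zs.foldl (fun st e =>
        let zr := pvZoneA st.1 cl (lk e.1)
        (zr.1, st.2.insert e.1 zr.2.2)) (p, res)).2
      = zs.foldl (fun res e => res.insert e.1 (pvZoneB c cl e.2)) res := by
  induction zs with
  | nil => exact fun _ _ _ _ _ _ => rfl
  | cons e zs ih =>
    intro p c h cl hmem lk hlk res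
    simp only [List.foldl_cons]
    rw [hlk e (List.mem_cons_self)]
    obtain ⟨hI, hK, hD⟩ := pvZone_go e.2 h (hmem e (List.mem_cons_self)) cl
      (PySem.Set.empty, [])
    have hzr : (pvZoneA p cl e.2).2.2 = pvZoneB c cl e.2 := congrArg Prod.snd hD
    rw [show pvZoneA p cl e.2 = ((pvZoneA p cl e.2).1, (pvZoneA p cl e.2).2) from rfl,
      hzr]
    have hmem' : ∀ e' ∈ zs, ∀ q ∈ e'.2,
        q.1 ∈ (pvZoneA p cl e.2).1.keys ∧ q.2 ∈ (pvZoneA p cl e.2).1.keys := by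
      intro e' he' q hq
      have := hmem e' (List.mem_cons_of_mem _ he') q hq
      exact ⟨hK ▸ this.1, hK ▸ this.2⟩
    exact ih hI cl hmem' lk (fun e' he' => hlk e' (List.mem_cons_of_mem _ he')) _

-- ===== VERDICT (by name: the statement is the Claim_ definition above) =====
theorem find_clusters_by_zone_spec : Claim_equal_find_clusters_by_zone := by
  intro g _hdom hpre
  unfold Spec_find_clusters_by_zone
  obtain ⟨hInv0, hmem0⟩ := pvPhase1_main g
  obtain ⟨hcl, hInv1, hkeys1⟩ := pvClusters_eq hInv0
  have hndk : (PySem.Dict.mk g).keys.Nodup := by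
    simpa [PySem.Dict.keys] using hpre
  have hlk : ∀ e ∈ g, (PySem.Dict.mk g).getD e.1 [] = e.2 := by
    intro e he
    exact PySem.Dict.getD_of_mem_items (PySem.Dict.mk g)
      (show (e.1, e.2) ∈ (PySem.Dict.mk g).items from he) hndk []
  have hmem1 : ∀ e ∈ g, ∀ q ∈ e.2,
      q.1 ∈ (pvGroupA (pvInitA g)).1.keys ∧ q.2 ∈ (pvGroupA (pvInitA g)).1.keys := by
    intro e he q hq
    obtain ⟨h1, h2⟩ := hmem0 e he q hq
    exact ⟨hkeys1 ▸ h1, hkeys1 ▸ h2⟩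
  have hres := pvRes_go g hInv1 (pvGroupA (pvInitA g)).2 hmem1
    (fun z => (PySem.Dict.mk g).getD z []) hlk PySem.Dict.empty
  conv at hres => rhs; rw [hcl]
  exact congrArg PySem.Dict.items hres
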